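-- pv_equiv track=rewrite | github.com/mtarnow/github-commit-bot | src/main.py | generate_file_lines
-- ===== SOURCE A (Python) =====
-- LINE_LENGTH = 100
--
-- def generate_file_lines(last_lines, includes_first_line):
--     lines = []
--     space_at = 0
--     i = 0
--     while i < len(last_lines):
--         i += space_at
--         if i + LINE_LENGTH - 1 < len(last_lines):
--             j = i + LINE_LENGTH - 1
--             space_at = 0
--             while last_lines[j] != ' ':
--                 j -= 1
--                 space_at -= 1
--         # last line
--         else:
--             j = len(last_lines) - 1
--         if i == 0 and includes_first_line:
--             line = 'commit_string = "' + last_lines[i:j+1] + '" \\\n'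
--         else:
--             line = ' '*16 + '"' + last_lines[i:j+1] + '" \\\n'
--         lines.append(line)
--         i += LINE_LENGTH
--
--     lines[-1] = lines[-1][:-3] + '\n'
--     return lines
-- ===== SOURCE B (Python) =====
-- LINE_LENGTH = 100
--
-- def generate_file_lines(last_lines, includes_first_line):
--     # Build a prefix table once: last_space[i] = index of the rightmost space at
--     # position <= i (-1 if none).  This removes any per-window scanning: each
--     # break point is a single O(1) table lookup.
--     n = len(last_lines)
--     last_space = []
--     prev = -1
--     for i, ch in enumerate(last_lines):
--         if ch == ' ':
--             prev = i
--         last_space.append(prev)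
--     out = []
--     start = 0
--     while start < n:
--         if start + LINE_LENGTH <= n:
--             b = last_space[start + LINE_LENGTH - 1]
--             if b < start:
--                 b = start + LINE_LENGTH - 1  # no space in the window: hard wrap
--         else:
--             b = n - 1
--         prefix = 'commit_string = "' if (start == 0 and includes_first_line) else ' ' * 16 + '"'
--         tail = '" \\\n' if b + 1 < n else '"\n'
--         out.append(prefix + last_lines[start:b + 1] + tail)
--         start = b + 1
--     return out
-- ===== Notes on version B (the rewrite author's own statement) =====
-- stated objective: alternative
-- what changed: Replaces A's per-window backward character scan (with negative space_at offsets threaded through the index bookkeeping and a post-hoc surgery on the last emitted line) by a last-space prefix table built once in a single forward pass, so each break point becomes one O(1) table lookup, and the last-line tail is chosen inline instead of patched afterwards.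
-- intended difference: On strings where a greedy segment start t satisfies t + 100 == len(last_lines) and the last character is not a space, A's loop exits after that segment and silently drops the characters after the space break, returning a truncated list; B keeps wrapping them into further lines, which is the intended behaviour (no part of the commit message is lost). — e.g. on generate_file_lines("a a a a a a a a a a a a a a a a a a a a a a a a a a a a a a a a a a a a a a a a a a a a a a a a a ab", true): A returns ["commit_string = \"a a a a a a a a a a a a a a a a a a a a a a a a a a a a a a a a a a a a a a a a a a a a a a a a a \…, B returns ["commit_string = \"a a a a a a a a a a a a a a a a a a a a a a a a a a a a a a a a a a a a a a a a a a a a a a a a a \…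
import Mathlib
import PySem

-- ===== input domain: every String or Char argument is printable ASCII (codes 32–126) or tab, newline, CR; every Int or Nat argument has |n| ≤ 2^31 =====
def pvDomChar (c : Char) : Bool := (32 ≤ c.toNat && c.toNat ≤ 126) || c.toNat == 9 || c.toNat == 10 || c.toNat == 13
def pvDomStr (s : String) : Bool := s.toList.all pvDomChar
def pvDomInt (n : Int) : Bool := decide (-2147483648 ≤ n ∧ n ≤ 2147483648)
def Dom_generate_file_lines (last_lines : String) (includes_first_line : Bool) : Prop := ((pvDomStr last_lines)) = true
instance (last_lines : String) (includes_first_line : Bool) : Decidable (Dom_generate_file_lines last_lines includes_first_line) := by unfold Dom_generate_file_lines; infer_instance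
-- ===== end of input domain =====

-- B replaces A's per-window backward scan by a last-space prefix table built once, with the break an O(1)
-- lookup and the last-line tail chosen inline; B intentionally keeps the characters A silently drops when a
-- space-broken window ends exactly at the end of the string (see D_ below); objective: alternative, no speed claim.

-- ===== PORT A =====
-- inner `while last_lines[j] != ' ': j -= 1; space_at -= 1` (negative j wraps as in Python via pyGet?;
-- pyGet? = none is Python's IndexError, reached only outside Pre_; fuel suffices before any such exit inside Pre_)
def pvScanA (cs : List Char) : Int → Int → Nat → Int × Int
  | j, sp, 0 => (j, sp)
  | j, sp, fuel + 1 =>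
    match PySem.List.pyGet? cs j with
    | none => (j, sp)          -- IndexError in Python: excluded by Pre_
    | some c => if c = ' ' then (j, sp) else pvScanA cs (j - 1) (sp - 1) fuel

-- outer `while i < len(last_lines)` loop, emitting the raw lines (each still ending in '" \\\n')
def pvLoopA (cs : List Char) (first : Bool) : Int → Int → Nat → List (List Char)
  | _, _, 0 => []              -- fuel cs.length+1 is never exhausted while the loop would continue
  | i, sp, fuel + 1 =>
    if i < (cs.length : Int) then
      let i' := i + sp
      let js : Int × Int :=
        if i' + 100 - 1 < (cs.length : Int) then
          pvScanA cs (i' + 100 - 1) 0 (i' + 100 + (cs.length : Int)).toNat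
        else ((cs.length : Int) - 1, sp)
      let line : List Char :=
        if i' = 0 ∧ first = true then
          "commit_string = \"".toList ++ PySem.List.slice cs (some i') (some (js.1 + 1)) ++ ['"', ' ', '\\', '\n']
        else
          List.replicate 16 ' ' ++ ['"'] ++ PySem.List.slice cs (some i') (some (js.1 + 1)) ++ ['"', ' ', '\\', '\n']
      line :: pvLoopA cs first (i' + 100) js.2 fuel
    else []

-- `lines[-1] = lines[-1][:-3] + '\n'` (on the empty list Python raises IndexError: excluded by Pre_)
def pvFixLast : List (List Char) → List (List Char)
  | [] => []
  | [l] => [PySem.List.slice l none (some (-3)) ++ ['\n']]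
  | l :: ls => l :: pvFixLast ls

def generate_file_lines (last_lines : String) (includes_first_line : Bool) : List String :=
  let cs := last_lines.toList
  (pvFixLast (pvLoopA cs includes_first_line 0 0 (cs.length + 1))).map String.ofList

-- ===== PORT B =====
-- the prefix table: last_space[i] = index of the rightmost space at position ≤ i, or the incoming prev (-1)
def pvLastSpace : List Char → Int → Int → List Int
  | [], _, _ => []
  | c :: rest, i, prev =>
    let p := if c = ' ' then i else prev
    p :: pvLastSpace rest (i + 1) p

-- the single rendering loop: break = table lookup, tail chosen inline by whether the loop continues
def pvWrapB (cs : List Char) (ls : List Int) (incl : Bool) : Int → Nat → List (List Char)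
  | _, 0 => []                 -- fuel cs.length+1 is never exhausted while the loop would continue
  | start, fuel + 1 =>
    if start < (cs.length : Int) then
      let b : Int :=
        if start + 100 ≤ (cs.length : Int) then
          let b0 := (PySem.List.pyGet? ls (start + 100 - 1)).getD (-1)   -- plain ls[start+99]; always in range here
          if b0 < start then start + 100 - 1 else b0                      -- no space in the window: hard wrap
        else (cs.length : Int) - 1
      let pre : List Char :=
        if start = 0 ∧ incl = true then "commit_string = \"".toList else List.replicate 16 ' ' ++ ['"']
      let tail : List Char := if b + 1 < (cs.length : Int) then ['"', ' ', '\\', '\n'] else ['"', '\n']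
      (pre ++ PySem.List.slice cs (some start) (some (b + 1)) ++ tail) :: pvWrapB cs ls incl (b + 1) fuel
    else []

def generate_file_lines_alt (last_lines : String) (includes_first_line : Bool) : List String :=
  let cs := last_lines.toList
  (pvWrapB cs (pvLastSpace cs 0 (-1)) includes_first_line 0 (cs.length + 1)).map String.ofList

-- ===== PRECONDITION & SPEC =====
-- Pre_ excludes the empty string (A's final `lines[-1]` raises IndexError) and strings containing 100
-- consecutive non-space characters (A's backward scan then wraps around via negative indices and either
-- raises IndexError or loops forever).
def Pre_generate_file_lines (last_lines : String) (includes_first_line : Bool) : Prop :=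
  last_lines.toList ≠ [] ∧
  ∀ k < last_lines.toList.length, k + 100 ≤ last_lines.toList.length →
    ' ' ∈ (last_lines.toList.drop k).take 100
instance (last_lines : String) (includes_first_line : Bool) : Decidable (Pre_generate_file_lines last_lines includes_first_line) := by unfold Pre_generate_file_lines; infer_instance

def pvWitness_generate_file_lines : String × Bool := ("hello world", true)

-- the greedy segment start positions (independent statement of the wrap's break points, used only by D_)
def pvStartsD (cs : List Char) : Nat → Nat → List Nat
  | t, 0 => []
  | t, fuel + 1 =>
    if t + 100 ≤ cs.length then
      t :: pvStartsD cs (t + (PySem.Chars.rfind ((cs.drop t).take 100) [' ']).toNat + 1) fuel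
    else if t < cs.length then [t] else []

-- On inputs where a greedy segment start t satisfies t + 100 = len(last_lines) and the final character is not a
-- space, A's loop exits after that segment and silently DROPS the characters after the break, while B keeps
-- wrapping them into further lines; B's value is the intended one (no part of the message is lost).
def D_generate_file_lines (last_lines : String) (includes_first_line : Bool) : Prop :=
  Pre_generate_file_lines last_lines includes_first_line ∧
  (∃ t ∈ pvStartsD last_lines.toList 0 (last_lines.toList.length + 1), t + 100 = last_lines.toList.length) ∧
  last_lines.toList.getLast? ≠ some ' '
instance (last_lines : String) (includes_first_line : Bool) : Decidable (D_generate_file_lines last_lines includes_first_line) := by unfold D_generate_file_lines; infer_instance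

def Spec_generate_file_lines (last_lines : String) (includes_first_line : Bool) (out : List String) : Prop := ¬ D_generate_file_lines last_lines includes_first_line → out = generate_file_lines_alt last_lines includes_first_line
instance (last_lines : String) (includes_first_line : Bool) (out : List String) : Decidable (Spec_generate_file_lines last_lines includes_first_line out) := by unfold Spec_generate_file_lines; infer_instance

def pvDiffWitness_generate_file_lines : String × Bool :=
  ("a a a a a a a a a a a a a a a a a a a a a a a a a a a a a a a a a a a a a a a a a a a a a a a a a ab", true)

def pvDiffWitnessOut_generate_file_lines : (List String) × (List String) :=
  (["commit_string = \"a a a a a a a a a a a a a a a a a a a a a a a a a a a a a a a a a a a a a a a a a a a a a a a a a \"\n"],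
   ["commit_string = \"a a a a a a a a a a a a a a a a a a a a a a a a a a a a a a a a a a a a a a a a a a a a a a a a a \" \\\n",
    "                \"ab\"\n"])

-- ===== CLAIM (what is proved, stated in full; the proofs are below) =====
def Claim_unchanged_generate_file_lines : Prop := ∀ (last_lines : String) (includes_first_line : Bool), Dom_generate_file_lines last_lines includes_first_line → Pre_generate_file_lines last_lines includes_first_line → Spec_generate_file_lines last_lines includes_first_line (generate_file_lines last_lines includes_first_line)
def Claim_changed_generate_file_lines : Prop := Dom_generate_file_lines (pvDiffWitness_generate_file_lines.1) (pvDiffWitness_generate_file_lines.2) ∧ Pre_generate_file_lines (pvDiffWitness_generate_file_lines.1) (pvDiffWitness_generate_file_lines.2) ∧ D_generate_file_lines (pvDiffWitness_generate_file_lines.1) (pvDiffWitness_generate_file_lines.2) ∧ generate_file_lines (pvDiffWitness_generate_file_lines.1) (pvDiffWitness_generate_file_lines.2) = pvDiffWitnessOut_generate_file_lines.1 ∧ generate_file_lines_alt (pvDiffWitness_generate_file_lines.1) (pvDiffWitness_generate_file_lines.2) = pvDiffWitnessOut_generate_file_lines.2 ∧ pvDiffWitnessOut_generate_file_lines.1 ≠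 pvDiffWitnessOut_generate_file_lines.2

def Claim_exact_generate_file_lines : Prop := ∀ (last_lines : String) (includes_first_line : Bool), Dom_generate_file_lines last_lines includes_first_line → Pre_generate_file_lines last_lines includes_first_line → D_generate_file_lines last_lines includes_first_line → generate_file_lines last_lines includes_first_line ≠ generate_file_lines_alt last_lines includes_first_line

-- ===== LEMMAS AND PROOFS =====

-- the common abstract description both ports are reduced to: the greedy (start, break) segment list
def pvSegsB (cs : List Char) : Int → Nat → List (Int × Int)
  | _, 0 => []
  | start, fuel + 1 =>
    if start < (cs.length : Int) then
      let brk : Int :=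
        if start + 100 ≤ (cs.length : Int) then
          let r := PySem.Chars.rfindFrom cs [' '] start (some (start + 100))
          if r < start then start + 100 - 1 else r
        else (cs.length : Int) - 1
      (start, brk) :: pvSegsB cs (brk + 1) fuel
    else []

def pvRawLine (cs : List Char) (first : Bool) (ab : Int × Int) : List Char :=
  (if ab.1 = 0 ∧ first = true then "commit_string = \"".toList else List.replicate 16 ' ' ++ ['"'])
    ++ PySem.List.slice cs (some ab.1) (some (ab.2 + 1)) ++ ['"', ' ', '\\', '\n']

def pvLastLine (cs : List Char) (first : Bool) (ab : Int × Int) : List Char :=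
  (if ab.1 = 0 ∧ first = true then "commit_string = \"".toList else List.replicate 16 ' ' ++ ['"'])
    ++ PySem.List.slice cs (some ab.1) (some (ab.2 + 1)) ++ ['"', '\n']

def pvML (cs : List Char) (first : Bool) : List (Int × Int) → List (List Char)
  | [] => []
  | [ab] => [pvLastLine cs first ab]
  | ab :: rest => pvRawLine cs first ab :: pvML cs first rest

theorem pv_prefix_space (w : List Char) : ([' '] : List Char) <+: w ↔ w[0]? = some ' ' := by
  cases w with
  | nil => simp
  | cons a l => simp [List.cons_prefix_cons, eq_comm]

theorem pv_go_succ (w : List Char) (k : Nat) :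
    PySem.Chars.rfind.go w [' '] (k+1) =
      if ([' '] : List Char) <+: w.drop (k+1) then ((k : Int)+1) else PySem.Chars.rfind.go w [' '] k := by
  simp [PySem.Chars.rfind.go]

theorem pv_go_zero (w : List Char) :
    PySem.Chars.rfind.go w [' '] 0 = if ([' '] : List Char) <+: w then 0 else -1 := by
  simp [PySem.Chars.rfind.go]

theorem pv_go_eq (w : List Char) (j : Nat) (hw : w[j]? = some ' ') :
    ∀ k, j ≤ k → (∀ m, j < m → m ≤ k → w[m]? ≠ some ' ') →
    PySem.Chars.rfind.go w [' '] k = (j : Int) := by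
  intro k
  induction k with
  | zero =>
    intro hj _
    interval_cases j
    rw [pv_go_zero, if_pos (by rw [pv_prefix_space]; exact hw)]
    simp
  | succ k ih =>
    intro hj hmax
    rw [pv_go_succ]
    by_cases hje : j = k + 1
    · subst hje
      rw [if_pos (by rw [pv_prefix_space]; simpa using hw)]
      push_cast; ring
    · have : (w.drop (k+1))[0]? = w[k+1]? := by simp
      rw [if_neg (by rw [pv_prefix_space, this]; exact hmax (k+1) (by omega) (by omega))]
      exact ih (by omega) (fun m h1 h2 => hmax m h1 (by omega))

theorem pv_rfind_spec (w : List Char) (hs : ' ' ∈ w) :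
    ∃ j : Nat, PySem.Chars.rfind w [' '] = (j : Int) ∧ j < w.length ∧ w[j]? = some ' ' ∧
      ∀ m, j < m → w[m]? ≠ some ' ' := by
  obtain ⟨i, hi, hEq⟩ := List.mem_iff_getElem.mp hs
  have hPi : w[i]? = some ' ' := by simp [List.getElem?_eq_getElem hi, hEq]
  have hspec : w[Nat.findGreatest (fun m => w[m]? = some ' ') w.length]? = some ' ' :=
    Nat.findGreatest_spec (P := fun m => w[m]? = some ' ') (show i ≤ w.length by omega) hPi
  have hmax : ∀ m, Nat.findGreatest (fun m => w[m]? = some ' ') w.length < m → w[m]? ≠ some ' ' := by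
    intro m h1 h2
    by_cases hm : m ≤ w.length
    · exact Nat.findGreatest_is_greatest h1 hm h2
    · rw [List.getElem?_eq_none (by omega)] at h2; simp at h2
  have hlt : Nat.findGreatest (fun m => w[m]? = some ' ') w.length < w.length := by
    by_contra h
    rw [List.getElem?_eq_none (by omega)] at hspec; simp at hspec
  refine ⟨_, ?_, hlt, hspec, hmax⟩
  show PySem.Chars.rfind.go w [' '] w.length = _
  exact pv_go_eq w _ hspec w.length (by omega) (fun m h1 _ => hmax m h1)

theorem pv_scan_down (cs : List Char) (j : Nat) (hw : cs[j]? = some ' ') :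
    ∀ d (p : Nat) (sp : Int) (fuel : Nat), p = j + d → d < fuel → p < cs.length →
      (∀ m, j < m → m ≤ p → cs[m]? ≠ some ' ') →
      pvScanA cs (p : Int) sp fuel = ((j : Int), sp - d) := by
  intro d
  induction d with
  | zero =>
    intro p sp fuel hp hf _ _
    have hpj : p = j := by omega
    subst hpj
    obtain ⟨fuel, rfl⟩ : ∃ f, fuel = f + 1 := ⟨fuel - 1, by omega⟩
    simp [pvScanA, PySem.List.pyGet?_natCast, hw]
  | succ d ih =>
    intro p sp fuel hp hf hlt hmax
    obtain ⟨fuel, rfl⟩ : ∃ f, fuel = f + 1 := ⟨fuel - 1, by omega⟩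
    have hget : PySem.List.pyGet? cs ((p : Nat) : Int) = cs[p]? := by
      simp [PySem.List.pyGet?_natCast]
    have hne : cs[p]? ≠ some ' ' := hmax p (by omega) (by omega)
    obtain ⟨c, hc⟩ : ∃ c, cs[p]? = some c := ⟨cs[p]'hlt, by simp⟩
    have hcne : c ≠ ' ' := by rintro rfl; exact hne hc
    have hstep : ((p : Int)) - 1 = (((p - 1 : Nat)) : Int) := by omega
    rw [show pvScanA cs ((p : Nat) : Int) sp (fuel+1)
          = pvScanA cs ((p:Int) - 1) (sp - 1) fuel from by
            simp [pvScanA, hget, hc, hcne]]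
    rw [hstep, ih (p-1) (sp-1) fuel (by omega) (by omega) (by omega)
        (fun m h1 h2 => hmax m h1 (by omega))]
    simp only [Prod.mk.injEq, true_and]
    push_cast; ring

theorem pv_rfindFrom_window (cs : List Char) (t : Nat) (h : t + 100 ≤ cs.length) :
    PySem.Chars.rfindFrom cs [' '] (t : Int) (some ((t : Int) + 100)) =
      (if PySem.Chars.rfind ((cs.drop t).take 100) [' '] = -1 then -1
       else (t : Int) + PySem.Chars.rfind ((cs.drop t).take 100) [' ']) := by
  have h1 : ¬ ((cs.length : Int) < (t : Int) + 100) := by push_cast; omega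
  have h2 : ¬ ((t : Int) + 100 < 0) := by omega
  have h3 : ¬ ((t : Int) < 0) := by omega
  have h4 : ¬ ((t : Int) + 100 < (t : Int)) := by omega
  have h5 : List.drop ((t:Int)).toNat (List.take (((t:Int)) + 100).toNat cs) = (cs.drop t).take 100 := by
    rw [List.drop_take]
    congr 1 <;> omega
  simp only [PySem.Chars.rfindFrom, h1, h2, h3, h4, if_false, if_neg h1, if_neg h2, if_neg h3, if_neg h4]
  rw [h5]

theorem pv_step (cs : List Char) (t : Nat) (h100 : t + 100 ≤ cs.length)
    (hs : ' ' ∈ (cs.drop t).take 100) :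
    ∃ jr : Nat, jr < 100 ∧
      PySem.Chars.rfind ((cs.drop t).take 100) [' '] = (jr : Int) ∧
      cs[t + jr]? = some ' ' ∧
      (∀ m, t + jr < m → m < t + 100 → cs[m]? ≠ some ' ') := by
  obtain ⟨jr, hrf, hlt, hw, hmax⟩ := pv_rfind_spec _ hs
  have hlen : ((cs.drop t).take 100).length = 100 := by
    simp [List.length_take, List.length_drop]; omega
  rw [hlen] at hlt
  have hwin : ∀ m < 100, ((cs.drop t).take 100)[m]? = cs[t + m]? := by
    intro m hm
    rw [List.getElem?_take_of_lt hm, List.getElem?_drop]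
  refine ⟨jr, hlt, hrf, ?_, ?_⟩
  · rw [← hwin jr hlt]; exact hw
  · intro m h1 h2
    have := hmax (m - t) (by omega)
    rw [hwin (m - t) (by omega)] at this
    have hmt : t + (m - t) = m := by omega
    rw [hmt] at this
    exact this

theorem pvLoopA_nil (cs : List Char) (first : Bool) (i sp : Int) (fuel : Nat)
    (h : ¬ i < (cs.length : Int)) : pvLoopA cs first i sp fuel = [] := by
  cases fuel <;> simp [pvLoopA, h]

theorem pvSegsB_nil (cs : List Char) (start : Int) (fuel : Nat)
    (h : ¬ start < (cs.length : Int)) : pvSegsB cs start fuel = [] := by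
  cases fuel <;> simp [pvSegsB, h]

theorem pvWrapB_nil (cs : List Char) (ls : List Int) (incl : Bool) (start : Int) (fuel : Nat)
    (h : ¬ start < (cs.length : Int)) : pvWrapB cs ls incl start fuel = [] := by
  cases fuel <;> simp [pvWrapB, h]

theorem pv_loop_eq (cs : List Char) (first : Bool)
    (P2 : ∀ k < cs.length, k + 100 ≤ cs.length → ' ' ∈ (cs.drop k).take 100) :
    ∀ fuel (t : Nat) (i sp : Int), (t : Int) = i + sp → t ≤ cs.length →
      (i < (cs.length : Int) ↔ t < cs.length) →
      (∀ u ∈ pvStartsD cs t fuel, ¬(u + 100 = cs.length ∧ cs.getLast? ≠ some ' ')) →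
      cs.length - t < fuel →
      pvLoopA cs first i sp fuel = (pvSegsB cs (t : Int) fuel).map (pvRawLine cs first) := by
  intro fuel
  induction fuel with
  | zero => intro t i sp _ _ _ _ hf; omega
  | succ fuel ih =>
    intro t i sp ht htle hiff hD hf
    by_cases hi : i < (cs.length : Int)
    · have htn : t < cs.length := hiff.mp hi
      have hi' : i + sp = (t : Int) := ht.symm
      by_cases h100 : t + 100 ≤ cs.length
      · -- scan branch
        have hcond : i + sp + 100 - 1 < (cs.length : Int) := by omega
        obtain ⟨jr, hjr, hrf, hw, hmax⟩ := pv_step cs t h100 (P2 t htn h100)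
        -- A's scan result
        have hscan : pvScanA cs (i + sp + 100 - 1) 0 ((i + sp + 100 + (cs.length : Int)).toNat)
            = (((t + jr : Nat) : Int), 0 - ((99 - jr : Nat) : Int)) := by
          rw [show i + sp + 100 - 1 = (((t + 99 : Nat)) : Int) by omega]
          exact pv_scan_down cs (t + jr) hw (99 - jr) (t + 99) 0 _ (by omega) (by omega)
            (by omega) (fun m h1 h2 => hmax m h1 (by omega))
        -- B's break
        have hbrk : PySem.Chars.rfindFrom cs [' '] ((t : Int)) (some ((t : Int) + 100))
            = ((t + jr : Nat) : Int) := by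
          rw [pv_rfindFrom_window cs t h100, hrf]
          rw [if_neg (by omega)]
          push_cast; ring
        have hnotlt : ¬ (((t + jr : Nat) : Int) < (t : Int)) := by push_cast; omega
        have hstarts : pvStartsD cs t (fuel + 1)
            = t :: pvStartsD cs (t + jr + 1) fuel := by
          simp only [pvStartsD, if_pos h100, hrf, Int.toNat_natCast]
        rw [hstarts] at hD
        -- unfold one step of both loops
        rw [show pvLoopA cs first i sp (fuel + 1)
              = (if i + sp = 0 ∧ first = true then
                  "commit_string = \"".toList ++ PySem.List.slice cs (some (i + sp)) (some (((t + jr : Nat) : Int)  + 1)) ++ ['"', ' ', '\\', '\n']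
                 else
                  List.replicate 16 ' ' ++ ['"'] ++ PySem.List.slice cs (some (i + sp)) (some (((t + jr : Nat) : Int) + 1)) ++ ['"', ' ', '\\', '\n'])
                :: pvLoopA cs first (i + sp + 100) (0 - ((99 - jr : Nat) : Int)) fuel from by
            simp only [pvLoopA, if_pos hi, if_pos hcond, hscan]]
        rw [show pvSegsB cs (t : Int) (fuel + 1)
              = ((t : Int), ((t + jr : Nat) : Int)) :: pvSegsB cs (((t + jr : Nat) : Int) + 1) fuel from by
            simp only [pvSegsB, hbrk, if_neg hnotlt,
              if_pos (show (t : Int) + 100 ≤ (cs.length : Int) by push_cast; omega)]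
            rw [if_pos (show (t : Int) < (cs.length : Int) by exact_mod_cast htn)]]
        rw [List.map_cons]
        have hline : (if i + sp = 0 ∧ first = true then
                  "commit_string = \"".toList ++ PySem.List.slice cs (some (i + sp)) (some (((t + jr : Nat) : Int) + 1)) ++ ['"', ' ', '\\', '\n']
                 else
                  List.replicate 16 ' ' ++ ['"'] ++ PySem.List.slice cs (some (i + sp)) (some (((t + jr : Nat) : Int) + 1)) ++ ['"', ' ', '\\', '\n'])
            = pvRawLine cs first ((t : Int), ((t + jr : Nat) : Int)) := by
          rw [hi']
          simp only [pvRawLine]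
          split_ifs <;> simp [List.append_assoc]
        rw [hline]
        congr 1
        by_cases hend : t + 100 = cs.length
        · -- the window ends exactly at the end of the string: both loops stop here
          have hlast : cs.getLast? = some ' ' := by
            have hhead := hD t (by simp)
            by_contra hne
            exact hhead ⟨hend, hne⟩
          have hj99 : jr = 99 := by
            by_contra hne
            have h1 : cs[t + 99]? = some ' ' := by
              rw [List.getLast?_eq_getElem?] at hlast
              rw [show t + 99 = cs.length - 1 by omega]
              exact hlast
            exact hmax (t + 99) (by omega) (by omega) h1
          subst hj99
          rw [pvLoopA_nil cs first _ _ _ (by omega),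
              pvSegsB_nil cs _ _ (by push_cast; omega)]
          simp
        · -- the loop continues: apply the induction hypothesis at start t + jr + 1
          have hnext := ih (t + jr + 1) (i + sp + 100) (0 - ((99 - jr : Nat) : Int))
            (by push_cast; omega) (by omega)
            (by constructor <;> intro <;> [push_cast; omega] <;> omega)
            (fun u hu => hD u (by simp [hu]))
            (by omega)
          rw [show (((t + jr : Nat) : Int) + 1) = (((t + jr + 1 : Nat)) : Int) by push_cast; ring]
          exact hnext
      · -- last-line branch
        have hcond : ¬ (i + sp + 100 - 1 < (cs.length : Int)) := by omega
        rw [show pvLoopA cs first i sp (fuel + 1)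
              = (if i + sp = 0 ∧ first = true then
                  "commit_string = \"".toList ++ PySem.List.slice cs (some (i + sp)) (some (((cs.length : Int) - 1) + 1)) ++ ['"', ' ', '\\', '\n']
                 else
                  List.replicate 16 ' ' ++ ['"'] ++ PySem.List.slice cs (some (i + sp)) (some (((cs.length : Int) - 1) + 1)) ++ ['"', ' ', '\\', '\n'])
                :: pvLoopA cs first (i + sp + 100) sp fuel from by
            simp only [pvLoopA, if_pos hi, if_neg hcond]]
        rw [show pvSegsB cs (t : Int) (fuel + 1)
              = ((t : Int), (cs.length : Int) - 1) :: pvSegsB cs (((cs.length : Int) - 1) + 1) fuel from by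
            simp only [pvSegsB, if_neg (show ¬ ((t : Int) + 100 ≤ (cs.length : Int)) by push_cast; omega)]
            rw [if_pos (show (t : Int) < (cs.length : Int) by exact_mod_cast htn)]]
        rw [List.map_cons]
        have hline : (if i + sp = 0 ∧ first = true then
                  "commit_string = \"".toList ++ PySem.List.slice cs (some (i + sp)) (some (((cs.length : Int) - 1) + 1)) ++ ['"', ' ', '\\', '\n']
                 else
                  List.replicate 16 ' ' ++ ['"'] ++ PySem.List.slice cs (some (i + sp)) (some (((cs.length : Int) - 1) + 1)) ++ ['"', ' ', '\\', '\n'])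
            = pvRawLine cs first ((t : Int), (cs.length : Int) - 1) := by
          rw [hi']
          simp only [pvRawLine]
          split_ifs <;> simp [List.append_assoc]
        rw [hline]
        congr 1
        rw [pvLoopA_nil cs first _ _ _ (by omega),
            pvSegsB_nil cs _ _ (by omega)]
        simp
    · have htn : ¬ t < cs.length := fun h => hi (hiff.mpr h)
      rw [pvLoopA_nil cs first i sp _ hi,
          pvSegsB_nil cs (t : Int) _ (by push_cast; omega)]
      simp

-- ===== the B side: the prefix table agrees with the window rfind =====

theorem pvLastSpace_none : ∀ (cs : List Char) (i0 prev : Int) (m : Nat), m < cs.length →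
    (∀ k, k ≤ m → cs[k]? ≠ some ' ') →
    (pvLastSpace cs i0 prev)[m]? = some prev := by
  intro cs
  induction cs with
  | nil => intro _ _ m hm _; simp at hm
  | cons c rest ih =>
    intro i0 prev m hm hno
    have hc : c ≠ ' ' := by
      intro hce
      exact hno 0 (by omega) (by simp [hce])
    cases m with
    | zero => simp [pvLastSpace, hc]
    | succ m =>
      simp only [pvLastSpace, if_neg hc]
      rw [List.getElem?_cons_succ]
      exact ih (i0 + 1) prev m (by simpa using hm)
        (fun k hk => by simpa using hno (k+1) (by omega))

theorem pvLastSpace_get : ∀ (cs : List Char) (i0 prev : Int) (j m : Nat), j ≤ m → m < cs.length →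
    cs[j]? = some ' ' → (∀ k, j < k → k ≤ m → cs[k]? ≠ some ' ') →
    (pvLastSpace cs i0 prev)[m]? = some (i0 + (j : Int)) := by
  intro cs
  induction cs with
  | nil => intro _ _ _ m _ hm _ _; simp at hm
  | cons c rest ih =>
    intro i0 prev j m hjm hm hw hmax
    cases m with
    | zero =>
      interval_cases j
      have hc : c = ' ' := by simpa using hw
      simp [pvLastSpace, hc]
    | succ m =>
      cases j with
      | zero =>
        have hc : c = ' ' := by simpa using hw
        simp only [pvLastSpace, if_pos hc, List.getElem?_cons_succ]
        rw [pvLastSpace_none rest (i0 + 1) i0 m (by simpa using hm)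
          (fun k hk => by simpa using hmax (k+1) (by omega) (by omega))]
        simp
      | succ j =>
        simp only [pvLastSpace, List.getElem?_cons_succ]
        rw [ih (i0 + 1) _ j m (by omega) (by simpa using hm) (by simpa using hw)
          (fun k h1 h2 => by simpa using hmax (k+1) (by omega) (by omega))]
        congr 1
        push_cast; ring

theorem pvSegsB_cons (cs : List Char) (start : Int) (fuel : Nat)
    (h : start < (cs.length : Int)) (hf : 0 < fuel) :
    ∃ b r, pvSegsB cs start fuel = (start, b) :: r := by
  obtain ⟨f, rfl⟩ : ∃ f, fuel = f + 1 := ⟨fuel - 1, by omega⟩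
  simp only [pvSegsB]
  rw [if_pos h]
  exact ⟨_, _, rfl⟩

theorem pv_wrap_eq (cs : List Char) (incl : Bool)
    (P2 : ∀ k < cs.length, k + 100 ≤ cs.length → ' ' ∈ (cs.drop k).take 100) :
    ∀ fuel (t : Nat), t ≤ cs.length → cs.length - t < fuel →
      pvWrapB cs (pvLastSpace cs 0 (-1)) incl (t : Int) fuel
        = pvML cs incl (pvSegsB cs (t : Int) fuel) := by
  intro fuel
  induction fuel with
  | zero => intro t _ hf; omega
  | succ fuel ih =>
    intro t htle hf
    by_cases htn : t < cs.length
    · have hi : (t : Int) < (cs.length : Int) := by exact_mod_cast htn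
      by_cases h100 : t + 100 ≤ cs.length
      · obtain ⟨jr, hjr, hrf, hw, hmax⟩ := pv_step cs t h100 (P2 t htn h100)
        -- B's table lookup produces the same break as the window rfind
        have hidx : (PySem.List.pyGet? (pvLastSpace cs 0 (-1)) ((t : Int) + 100 - 1)).getD (-1)
            = ((t + jr : Nat) : Int) := by
          rw [show (t : Int) + 100 - 1 = (((t + 99 : Nat)) : Int) by push_cast; ring]
          rw [PySem.List.pyGet?_natCast]
          rw [pvLastSpace_get cs 0 (-1) (t + jr) (t + 99) (by omega)
            (by omega) hw
            (fun k h1 h2 => hmax k h1 (by omega))]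
          simp
        have hbrk : PySem.Chars.rfindFrom cs [' '] ((t : Int)) (some ((t : Int) + 100))
            = ((t + jr : Nat) : Int) := by
          rw [pv_rfindFrom_window cs t h100, hrf]
          rw [if_neg (by omega)]
          push_cast; ring
        have hnotlt : ¬ (((t + jr : Nat) : Int) < (t : Int)) := by push_cast; omega
        have hB : pvWrapB cs (pvLastSpace cs 0 (-1)) incl (t : Int) (fuel + 1)
            = ((if (t : Int) = 0 ∧ incl = true then "commit_string = \"".toList
                else List.replicate 16 ' ' ++ ['"'])
               ++ PySem.List.slice cs (some (t : Int)) (some (((t + jr : Nat) : Int) + 1))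
               ++ (if ((t + jr : Nat) : Int) + 1 < (cs.length : Int) then ['"', ' ', '\\', '\n'] else ['"', '\n']))
              :: pvWrapB cs (pvLastSpace cs 0 (-1)) incl (((t + jr : Nat) : Int) + 1) fuel := by
          simp only [pvWrapB, if_pos hi,
            if_pos (show (t : Int) + 100 ≤ (cs.length : Int) by push_cast; omega), hidx,
            if_neg hnotlt]
        have hS : pvSegsB cs (t : Int) (fuel + 1)
            = ((t : Int), ((t + jr : Nat) : Int)) :: pvSegsB cs (((t + jr : Nat) : Int) + 1) fuel := by
          simp only [pvSegsB, hbrk, if_neg hnotlt,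
            if_pos (show (t : Int) + 100 ≤ (cs.length : Int) by push_cast; omega)]
          rw [if_pos hi]
        rw [hB, hS]
        by_cases hnext : t + jr + 1 < cs.length
        · -- the loop continues: the segment after (t, t+jr) exists, so the tail keeps the ' \\' ending
          have hni : (((t + jr : Nat) : Int) + 1) < (cs.length : Int) := by push_cast; omega
          rw [if_pos hni]
          rw [show (((t + jr : Nat) : Int) + 1) = (((t + jr + 1 : Nat)) : Int) by push_cast; ring]
          have hrec := ih (t + jr + 1) (by omega) (by omega)
          obtain ⟨b2, r2, hcons⟩ := pvSegsB_cons cs (((t + jr + 1 : Nat)) : Int) fuel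
            (by push_cast; omega) (by omega)
          rw [hcons]
          simp only [pvML]
          rw [← hcons, hrec]
          congr 1
        · -- (t, t+jr) is the last segment: tail '\n', recursion empty on both sides
          have hge : ¬ ((((t + jr : Nat) : Int) + 1) < (cs.length : Int)) := by push_cast; omega
          rw [pvWrapB_nil _ _ _ _ _ hge, pvSegsB_nil _ _ _ hge, if_neg hge]
          simp only [pvML, pvLastLine, List.append_assoc]
      · -- last-line branch: b = length - 1, both sides emit one final line and stop
        have hnle : ¬ ((t : Int) + 100 ≤ (cs.length : Int)) := by push_cast; omega
        have hge : ¬ (((cs.length : Int) - 1) + 1 < (cs.length : Int)) := by omega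
        have hB : pvWrapB cs (pvLastSpace cs 0 (-1)) incl (t : Int) (fuel + 1)
            = ((if (t : Int) = 0 ∧ incl = true then "commit_string = \"".toList
                else List.replicate 16 ' ' ++ ['"'])
               ++ PySem.List.slice cs (some (t : Int)) (some (((cs.length : Int) - 1) + 1))
               ++ (if ((cs.length : Int) - 1) + 1 < (cs.length : Int) then ['"', ' ', '\\', '\n'] else ['"', '\n']))
              :: pvWrapB cs (pvLastSpace cs 0 (-1)) incl (((cs.length : Int) - 1) + 1) fuel := by
          simp only [pvWrapB, if_pos hi, if_neg hnle]
        have hS : pvSegsB cs (t : Int) (fuel + 1)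
            = ((t : Int), (cs.length : Int) - 1) :: pvSegsB cs (((cs.length : Int) - 1) + 1) fuel := by
          simp only [pvSegsB, if_neg hnle]
          rw [if_pos hi]
        rw [hB, hS, pvWrapB_nil _ _ _ _ _ hge, pvSegsB_nil _ _ _ hge, if_neg hge]
        simp only [pvML, pvLastLine, List.append_assoc]
    · have hni : ¬ ((t : Int) < (cs.length : Int)) := by push_cast; omega
      rw [pvWrapB_nil _ _ _ _ _ hni, pvSegsB_nil _ _ _ hni]
      rfl

theorem pv_slice_drop3 (x : List Char) (a b c : Char) :
    PySem.List.slice (x ++ [a, b, c]) none (some (-3)) = x := by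
  rw [PySem.List.slice_to_neg_ofNat _ 3 (by norm_num)]
  simp

theorem pv_fix_raw (cs : List Char) (first : Bool) (ab : Int × Int) :
    PySem.List.slice (pvRawLine cs first ab) none (some (-3)) ++ ['\n'] = pvLastLine cs first ab := by
  have h : pvRawLine cs first ab =
      ((if ab.1 = 0 ∧ first = true then "commit_string = \"".toList else List.replicate 16 ' ' ++ ['"'])
        ++ PySem.List.slice cs (some ab.1) (some (ab.2 + 1)) ++ ['"']) ++ [' ', '\\', '\n'] := by
    simp [pvRawLine, List.append_assoc]
  rw [h, pv_slice_drop3]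
  simp [pvLastLine, List.append_assoc]

theorem pv_fixlast_map (cs : List Char) (first : Bool) :
    ∀ segs : List (Int × Int), segs ≠ [] →
      pvFixLast (segs.map (pvRawLine cs first)) = pvML cs first segs := by
  intro segs
  induction segs with
  | nil => intro h; exact absurd rfl h
  | cons ab rest ih =>
    intro _
    cases rest with
    | nil => simp [pvFixLast, pvML, pv_fix_raw]
    | cons r rs =>
      simp only [List.map_cons, pvFixLast, pvML]
      rw [← List.map_cons, ih (by simp)]

theorem pv_segsB_ne_nil (cs : List Char) (h : cs ≠ []) :
    pvSegsB cs 0 (cs.length + 1) ≠ [] := by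
  have hn : 0 < cs.length := List.length_pos_iff.mpr h
  simp only [pvSegsB]
  rw [if_pos (show (0 : Int) < (cs.length : Int) by exact_mod_cast hn)]
  simp

theorem pv_fixlast_length (l : List (List Char)) : (pvFixLast l).length = l.length := by
  induction l with
  | nil => simp [pvFixLast]
  | cons a rest ih =>
    cases rest with
    | nil => simp [pvFixLast]
    | cons b bs => simpa [pvFixLast] using ih

theorem pvML_length (cs : List Char) (first : Bool) :
    ∀ segs : List (Int × Int), (pvML cs first segs).length = segs.length := by
  intro segs
  induction segs with
  | nil => rfl
  | cons ab rest ih =>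
    cases rest with
    | nil => rfl
    | cons r rs => simpa [pvML] using ih

theorem pv_segsB_cons_length (cs : List Char) (start : Int) (fuel : Nat)
    (h : start < (cs.length : Int)) (hf : 0 < fuel) : 0 < (pvSegsB cs start fuel).length := by
  obtain ⟨f, rfl⟩ : ∃ f, fuel = f + 1 := ⟨fuel - 1, by omega⟩
  simp only [pvSegsB]
  rw [if_pos h]
  simp

theorem pv_loop_lt (cs : List Char) (first : Bool)
    (P2 : ∀ k < cs.length, k + 100 ≤ cs.length → ' ' ∈ (cs.drop k).take 100)
    (hlast : cs.getLast? ≠ some ' ') :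
    ∀ fuel (t : Nat) (i sp : Int), (t : Int) = i + sp → t ≤ cs.length →
      (i < (cs.length : Int) ↔ t < cs.length) →
      (∃ u ∈ pvStartsD cs t fuel, u + 100 = cs.length) →
      cs.length - t < fuel →
      (pvLoopA cs first i sp fuel).length < (pvSegsB cs (t : Int) fuel).length := by
  intro fuel
  induction fuel with
  | zero => intro t i sp _ _ _ _ hf; omega
  | succ fuel ih =>
    intro t i sp ht htle hiff hEx hf
    by_cases hi : i < (cs.length : Int)
    · have htn : t < cs.length := hiff.mp hi
      have hi' : i + sp = (t : Int) := ht.symm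
      by_cases h100 : t + 100 ≤ cs.length
      · have hcond : i + sp + 100 - 1 < (cs.length : Int) := by omega
        obtain ⟨jr, hjr, hrf, hw, hmax⟩ := pv_step cs t h100 (P2 t htn h100)
        have hscan : pvScanA cs (i + sp + 100 - 1) 0 ((i + sp + 100 + (cs.length : Int)).toNat)
            = (((t + jr : Nat) : Int), 0 - ((99 - jr : Nat) : Int)) := by
          rw [show i + sp + 100 - 1 = (((t + 99 : Nat)) : Int) by omega]
          exact pv_scan_down cs (t + jr) hw (99 - jr) (t + 99) 0 _ (by omega) (by omega)
            (by omega) (fun m h1 h2 => hmax m h1 (by omega))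
        have hbrk : PySem.Chars.rfindFrom cs [' '] ((t : Int)) (some ((t : Int) + 100))
            = ((t + jr : Nat) : Int) := by
          rw [pv_rfindFrom_window cs t h100, hrf]
          rw [if_neg (by omega)]
          push_cast; ring
        have hnotlt : ¬ (((t + jr : Nat) : Int) < (t : Int)) := by push_cast; omega
        have hA : pvLoopA cs first i sp (fuel + 1)
            = (if i + sp = 0 ∧ first = true then
                "commit_string = \"".toList ++ PySem.List.slice cs (some (i + sp)) (some (((t + jr : Nat) : Int) + 1)) ++ ['"', ' ', '\\', '\n']
               else
                List.replicate 16 ' ' ++ ['"'] ++ PySem.List.slice cs (some (i + sp)) (some (((t + jr : Nat) : Int) + 1)) ++ ['"', ' ', '\\', '\n'])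
              :: pvLoopA cs first (i + sp + 100) (0 - ((99 - jr : Nat) : Int)) fuel := by
          simp only [pvLoopA, if_pos hi, if_pos hcond, hscan]
        have hB : pvSegsB cs (t : Int) (fuel + 1)
            = ((t : Int), ((t + jr : Nat) : Int)) :: pvSegsB cs (((t + jr : Nat) : Int) + 1) fuel := by
          simp only [pvSegsB, hbrk, if_neg hnotlt,
            if_pos (show (t : Int) + 100 ≤ (cs.length : Int) by push_cast; omega)]
          rw [if_pos (show (t : Int) < (cs.length : Int) by exact_mod_cast htn)]
        rw [hA, hB]
        simp only [List.length_cons, Nat.add_lt_add_iff_right]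
        by_cases hend : t + 100 = cs.length
        · -- the bad start itself: A's loop exits, B still has the tail to wrap
          have hj99 : jr ≠ 99 := by
            intro hje
            apply hlast
            rw [List.getLast?_eq_getElem?, show cs.length - 1 = t + 99 by omega]
            rw [hje] at hw
            exact hw
          rw [pvLoopA_nil cs first _ _ _ (by omega)]
          simpa using pv_segsB_cons_length cs _ fuel (by push_cast; omega) (by omega)
        · -- lockstep step; the bad start is further right
          have hstarts : pvStartsD cs t (fuel + 1)
              = t :: pvStartsD cs (t + jr + 1) fuel := by
            simp only [pvStartsD, if_pos h100, hrf, Int.toNat_natCast]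
          obtain ⟨u, hu, hu100⟩ := hEx
          rw [hstarts] at hu
          have hu' : u ∈ pvStartsD cs (t + jr + 1) fuel := by
            rcases List.mem_cons.mp hu with h | h
            · omega
            · exact h
          have := ih (t + jr + 1) (i + sp + 100) (0 - ((99 - jr : Nat) : Int))
            (by push_cast; omega) (by omega)
            (by constructor <;> intro h <;> [push_cast; omega] <;> omega)
            ⟨u, hu', hu100⟩ (by omega)
          rw [show (((t + jr : Nat) : Int) + 1) = (((t + jr + 1 : Nat)) : Int) by push_cast; ring]
          exact this
      · -- last-line branch: no start here can satisfy u + 100 = length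
        obtain ⟨u, hu, hu100⟩ := hEx
        have : pvStartsD cs t (fuel + 1) = [t] := by
          simp only [pvStartsD, if_neg h100]
          rw [if_pos htn]
        rw [this] at hu
        simp at hu
        omega
    · obtain ⟨u, hu, _⟩ := hEx
      have : pvStartsD cs t (fuel + 1) = [] := by
        have h1 : ¬ (t + 100 ≤ cs.length) := by
          have : ¬ t < cs.length := fun h => hi (hiff.mpr h)
          omega
        have h2 : ¬ t < cs.length := fun h => hi (hiff.mpr h)
        simp only [pvStartsD, if_neg h1]
        rw [if_neg h2]
      rw [this] at hu
      simp at hu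

-- ===== VERDICT (by name: the statement is the Claim_ definition above) =====

set_option maxRecDepth 100000 in
theorem generate_file_lines_changed : Claim_changed_generate_file_lines := by
  unfold Claim_changed_generate_file_lines; decide

theorem generate_file_lines_spec : Claim_unchanged_generate_file_lines := by
  intro s first _ hPre hnD
  obtain ⟨P1, P2⟩ := hPre
  show generate_file_lines s first = generate_file_lines_alt s first
  simp only [generate_file_lines, generate_file_lines_alt]
  have HD : ∀ u ∈ pvStartsD s.toList 0 (s.toList.length + 1),
      ¬(u + 100 = s.toList.length ∧ s.toList.getLast? ≠ some ' ') := by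
    rintro u hu ⟨h1, h2⟩
    exact hnD ⟨⟨P1, P2⟩, ⟨u, hu, h1⟩, h2⟩
  have hloop := pv_loop_eq s.toList first P2 (s.toList.length + 1) 0 0 0 (by simp)
    (by omega)
    (by constructor <;> intro h <;> exact_mod_cast h)
    HD (by omega)
  have hwrap := pv_wrap_eq s.toList first P2 (s.toList.length + 1) 0 (by omega) (by omega)
  rw [hloop, show ((0 : Nat) : Int) = (0 : Int) from rfl,
     pv_fixlast_map _ _ _ (pv_segsB_ne_nil s.toList P1)]
  rw [show ((0 : Nat) : Int) = (0 : Int) from rfl] at hwrap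
  rw [hwrap]

theorem generate_file_lines_tight : Claim_exact_generate_file_lines := by
  intro s first _ hPre hD hEq
  obtain ⟨⟨P1, P2⟩, ⟨u, hu, h100⟩, hlast⟩ := hD
  have hlen := congrArg List.length hEq
  simp only [generate_file_lines, generate_file_lines_alt, List.length_map] at hlen
  have hwrap := pv_wrap_eq s.toList first P2 (s.toList.length + 1) 0 (by omega) (by omega)
  rw [show ((0 : Nat) : Int) = (0 : Int) from rfl] at hwrap
  rw [pv_fixlast_length, hwrap, pvML_length] at hlen
  have hlt := pv_loop_lt s.toList first P2 hlast (s.toList.length + 1) 0 0 0 (by simp)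
    (by omega) (by constructor <;> intro h <;> exact_mod_cast h) ⟨u, hu, h100⟩ (by omega)
  rw [show ((0 : Nat) : Int) = (0 : Int) from rfl] at hlt
  omega
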